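-- pv_equiv track=rewrite | github.com/kkt3343/CodingTest | 최빈값.py | solution
-- ===== SOURCE A (Python) =====
-- def solution(array):
--     answer = 0
--     bindo = 0
--     dictionary = {}
--     for i in range(len(array)):
--         try:
--             dictionary[array[i]] += 1
--         except:
--             dictionary[array[i]] = 1
--
--
--     for key, value in dictionary.items():
--         if bindo < value:
--             bindo = value
--             answer = key
--
--     tmp = 0
--     for value in dictionary.values():
--         if value == bindo:
--             tmp = tmp + 1
--         if tmp == 2:
--             return -1
--
--     return answer
-- ===== SOURCE B (Python) =====
-- def solution(array):
--     # single pass: maintain running counts plus current leader and a tie flag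
--     counts = {}
--     best_key = 0
--     best = 0
--     tie = False
--     for x in array:
--         c = counts.get(x, 0) + 1
--         counts[x] = c
--         if c > best:
--             best, best_key, tie = c, x, False
--         elif c == best:
--             tie = True
--     return -1 if tie else best_key
-- ===== Notes on version B (the rewrite author's own statement) =====
-- stated objective: faster
-- what changed: Replaced A's three separate passes (build a count dict via try/except, scan items for the max, rescan values for a tie) by a single online pass that maintains the running leader, its count and a tie flag while counting.
import Mathlib
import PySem

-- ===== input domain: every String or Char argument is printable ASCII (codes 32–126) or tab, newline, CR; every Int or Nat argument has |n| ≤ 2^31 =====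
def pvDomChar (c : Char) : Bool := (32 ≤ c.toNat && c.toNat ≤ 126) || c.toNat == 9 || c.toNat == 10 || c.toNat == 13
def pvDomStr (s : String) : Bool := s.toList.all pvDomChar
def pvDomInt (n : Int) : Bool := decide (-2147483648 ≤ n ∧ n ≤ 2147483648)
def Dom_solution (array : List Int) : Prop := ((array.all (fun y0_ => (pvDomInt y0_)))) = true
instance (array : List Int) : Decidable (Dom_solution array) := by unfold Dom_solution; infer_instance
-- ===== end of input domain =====

-- B replaces A's three passes (count dict, max scan, tie re-scan) with one online pass keeping leader/count/tie (measured faster in a timing run).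

-- ===== PORT A =====
-- the counting loop body: try dictionary[array[i]] += 1 except: dictionary[array[i]] = 1
def aStep1 (array : List Int) (d : PySem.Dict Int Int) (i : Int) : PySem.Dict Int Int :=
  let x := PySem.List.pyGetD array i 0
  if d.contains x then d.insert x (d.getD x 0 + 1) else d.insert x 1

-- the second loop body: if bindo < value: bindo, answer := value, key
def aStep2 (st : Int × Int) (kv : Int × Int) : Int × Int :=
  if st.1 < kv.2 then (kv.2, kv.1) else st

-- the third loop with its early 'return -1'
def solLoop3 (vals : List Int) (bindo tmp answer : Int) : Int :=
  match vals with
  | [] => answer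
  | v :: rest =>
    let tmp' := if v == bindo then tmp + 1 else tmp
    if tmp' == 2 then -1 else solLoop3 rest bindo tmp' answer

def solution (array : List Int) : Int :=
  let dictionary : PySem.Dict Int Int :=
    (PySem.List.pyRange 0 (PySem.List.len array) 1).foldl (aStep1 array) PySem.Dict.empty
  let st := dictionary.items.foldl aStep2 (0, 0)
  solLoop3 dictionary.values st.1 0 st.2

-- ===== PORT B =====
-- one pass: state (counts, best_key, best, tie)
def bStep (s : PySem.Dict Int Int × Int × Int × Bool) (x : Int) :
    PySem.Dict Int Int × Int × Int × Bool :=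
  let c := s.1.getD x 0 + 1
  let counts := s.1.insert x c
  if s.2.2.1 < c then (counts, x, c, false)
  else if c == s.2.2.1 then (counts, s.2.1, s.2.2.1, true)
  else (counts, s.2.1, s.2.2.1, s.2.2.2)

def solution_alt (array : List Int) : Int :=
  let st := array.foldl bStep (PySem.Dict.empty, 0, 0, false)
  if st.2.2.2 then -1 else st.2.1

-- ===== PRECONDITION & SPEC =====
def Spec_solution (array : List Int) (out : Int) : Prop := out = solution_alt array
instance (array : List Int) (out : Int) : Decidable (Spec_solution array out) := by unfold Spec_solution; infer_instance

-- ===== CLAIM (what is proved, stated in full; the proofs are below) =====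
def Claim_equal_solution : Prop := ∀ (array : List Int), Dom_solution array → Spec_solution array (solution array)

-- ===== LEMMAS AND PROOFS =====

-- integer-valued multiplicity
def cntI (p : List Int) (x : Int) : Int := (p.count x : Int)

-- invariant of B's online pass over the processed prefix p
def BInv (p : List Int) (bk b : Int) (tie : Bool) : Prop :=
  0 ≤ b ∧
  (∀ x, cntI p x ≤ b) ∧
  (p = [] → bk = 0 ∧ b = 0 ∧ tie = false) ∧
  (p ≠ [] → ∃ x ∈ p, cntI p x = b) ∧
  (tie = false → p ≠ [] → bk ∈ p ∧ cntI p bk = b ∧ ∀ x ∈ p, cntI p x = b → x = bk) ∧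
  (tie = true → ∃ x ∈ p, ∃ y ∈ p, x ≠ y ∧ cntI p x = b ∧ cntI p y = b)

lemma cnt_append_singleton (p : List Int) (a x : Int) :
    cntI (p ++ [a]) x = if x = a then cntI p x + 1 else cntI p x := by
  unfold cntI
  rw [List.count_append]
  by_cases h : x = a
  · subst h; simp
  · have h1 : [a].count x = 0 := by
      simp [List.count_singleton]
      omega
    rw [h1, if_neg h]
    simp

lemma cnt_pos (p : List Int) (x : Int) (h : x ∈ p) : 1 ≤ cntI p x := by
  have := List.count_pos_iff.mpr h
  unfold cntI; omega

lemma inv_nil : BInv [] 0 0 false := by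
  refine ⟨le_refl 0, ?_, by simp, by simp, by simp, by simp⟩
  intro x; simp [cntI]

lemma inv_step (p : List Int) (bk b : Int) (tie : Bool) (a : Int)
    (hI : BInv p bk b tie) :
    (b < cntI p a + 1 → BInv (p ++ [a]) a (cntI p a + 1) false) ∧
    (¬ b < cntI p a + 1 → cntI p a + 1 = b → BInv (p ++ [a]) bk b true) ∧
    (¬ b < cntI p a + 1 → cntI p a + 1 ≠ b → BInv (p ++ [a]) bk b tie) := by
  obtain ⟨hb0, hle, hnil, hatt, hun, htie⟩ := hI
  set c := cntI p a + 1 with hc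
  have hca : cntI (p ++ [a]) a = c := by rw [cnt_append_singleton]; simp [hc]
  have hcne : ∀ x, x ≠ a → cntI (p ++ [a]) x = cntI p x := by
    intro x hx; rw [cnt_append_singleton]; simp [hx]
  refine ⟨?_, ?_, ?_⟩
  · -- new strict leader
    intro hlt
    refine ⟨by omega, ?_, by simp, ?_, ?_, by simp⟩
    · intro x
      by_cases hx : x = a
      · subst hx; omega
      · rw [hcne x hx]; have := hle x; omega
    · intro _; exact ⟨a, by simp, hca⟩
    · intro _ _
      refine ⟨by simp, hca, ?_⟩
      intro x hx hxc
      by_cases hxa : x = a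
      · exact hxa
      · exfalso; rw [hcne x hxa] at hxc; have := hle x; omega
  · -- ties the current max
    intro hge heq
    have hpne : p ≠ [] := by
      intro h
      obtain ⟨_, hbz, _⟩ := hnil h
      have h0 : cntI p a = 0 := by subst h; simp [cntI]
      omega
    obtain ⟨y, hy, hyc⟩ := hatt hpne
    have hya : y ≠ a := by
      intro h; subst h; omega
    refine ⟨hb0, ?_, by simp [hpne], ?_, by simp, ?_⟩
    · intro x
      by_cases hx : x = a
      · subst hx; omega
      · rw [hcne x hx]; exact hle x
    · intro _; exact ⟨y, by simp [hy], by rw [hcne y hya]; exact hyc⟩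
    · intro _
      exact ⟨a, by simp, y, by simp [hy], fun h => hya h.symm,
        by omega, by rw [hcne y hya]; exact hyc⟩
  · -- strictly below the max: nothing changes
    intro hge hne
    have hclt : c < b := by omega
    have hpne : p ≠ [] := by
      intro h; subst h
      have h0 : cntI ([] : List Int) a = 0 := by simp [cntI]
      have := hnil rfl; omega
    obtain ⟨y, hy, hyc⟩ := hatt hpne
    have hya : y ≠ a := by intro h; subst h; omega
    refine ⟨hb0, ?_, by simp [hpne], ?_, ?_, ?_⟩
    · intro x
      by_cases hx : x = a
      · subst hx; omega
      · rw [hcne x hx]; exact hle x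
    · intro _; exact ⟨y, by simp [hy], by rw [hcne y hya]; exact hyc⟩
    · intro ht _
      obtain ⟨hbk, hbkc, huniq⟩ := hun ht hpne
      have hbka : bk ≠ a := by intro h; subst h; omega
      refine ⟨by simp [hbk], by rw [hcne bk hbka]; exact hbkc, ?_⟩
      intro x hx hxc
      by_cases hxa : x = a
      · exfalso; subst hxa; omega
      · rw [hcne x hxa] at hxc
        rcases List.mem_append.mp hx with h | h
        · exact huniq x h hxc
        · simp at h; exact absurd h hxa
    · intro ht
      obtain ⟨x, hx, y', hy', hxy, hxc, hyc'⟩ := htie ht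
      have hxa : x ≠ a := by intro h; subst h; omega
      have hy'a : y' ≠ a := by intro h; subst h; omega
      exact ⟨x, by simp [hx], y', by simp [hy'], hxy,
        by rw [hcne x hxa]; exact hxc, by rw [hcne y' hy'a]; exact hyc'⟩

-- B's fold maintains the counter and the invariant
lemma bfold_inv : ∀ (l p : List Int) (d : PySem.Dict Int Int) (bk b : Int) (tie : Bool),
    (∀ x, d.getD x 0 = cntI p x) → BInv p bk b tie →
    (∀ x, (l.foldl bStep (d, bk, b, tie)).1.getD x 0 = cntI (p ++ l) x) ∧
    BInv (p ++ l) (l.foldl bStep (d, bk, b, tie)).2.1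
      (l.foldl bStep (d, bk, b, tie)).2.2.1 (l.foldl bStep (d, bk, b, tie)).2.2.2 := by
  intro l
  induction l with
  | nil => intro p d bk b tie hd hI; simpa using ⟨hd, hI⟩
  | cons a l ih =>
    intro p d bk b tie hd hI
    have hstep := inv_step p bk b tie a hI
    have hda : d.getD a 0 + 1 = cntI p a + 1 := by rw [hd a]
    have hd' : ∀ x, (d.insert a (d.getD a 0 + 1)).getD x 0 = cntI (p ++ [a]) x := by
      intro x
      rw [PySem.Dict.getD_insert, cnt_append_singleton]
      split_ifs with h
      · rw [hd a, h]
      · exact hd x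
    have hrw : p ++ a :: l = (p ++ [a]) ++ l := by simp
    rw [List.foldl_cons, hrw]
    by_cases h1 : b < d.getD a 0 + 1
    · have hb : bStep (d, bk, b, tie) a =
          (d.insert a (d.getD a 0 + 1), a, d.getD a 0 + 1, false) := by
        simp only [bStep, h1, if_pos]
      rw [hb]
      refine ih (p ++ [a]) _ _ _ _ hd' ?_
      rw [hda]; exact hstep.1 (by omega)
    · by_cases h2 : d.getD a 0 + 1 = b
      · have hb : bStep (d, bk, b, tie) a =
            (d.insert a (d.getD a 0 + 1), bk, b, true) := by
          simp only [bStep]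
          rw [if_neg h1, if_pos (by simpa using h2)]
        rw [hb]
        refine ih (p ++ [a]) _ _ _ _ hd' ?_
        exact hstep.2.1 (by omega) (by omega)
      · have hb : bStep (d, bk, b, tie) a =
            (d.insert a (d.getD a 0 + 1), bk, b, tie) := by
          simp only [bStep]
          rw [if_neg h1, if_neg (by simpa using h2)]
        rw [hb]
        refine ih (p ++ [a]) _ _ _ _ hd' ?_
        exact hstep.2.2 (by omega) (by omega)

lemma inv_of_foldl (array : List Int) :
    BInv array (array.foldl bStep (PySem.Dict.empty, 0, 0, false)).2.1
      (array.foldl bStep (PySem.Dict.empty, 0, 0, false)).2.2.1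
      (array.foldl bStep (PySem.Dict.empty, 0, 0, false)).2.2.2 := by
  have h := bfold_inv array [] PySem.Dict.empty 0 0 false
    (by intro x; simp [cntI]) inv_nil
  simpa using h.2

-- A's counting loop builds the counter
lemma adict_eq_counter (array : List Int) :
    (PySem.List.pyRange 0 (PySem.List.len array) 1).foldl (aStep1 array) PySem.Dict.empty
      = PySem.Dict.counter array := by
  have hfun : aStep1 array = fun d i =>
      (fun (d : PySem.Dict Int Int) x => d.insert x (d.getD x 0 + 1))
        d (PySem.List.pyGetD array i 0) := by
    funext d i
    simp only [aStep1]
    by_cases h : (PySem.Dict.contains d (PySem.List.pyGetD array i 0)) = true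
    · simp [h]
    · have h' : d.contains (PySem.List.pyGetD array i 0) = false := by
        simpa using h
      have h0 : d.getD (PySem.List.pyGetD array i 0) 0 = 0 :=
        PySem.Dict.getD_of_not_contains _ _ h'
      simp [h', h0]
  rw [hfun,
    PySem.List.foldl_pyRange_zero_pyGetD array 0
      (fun (d : PySem.Dict Int Int) x => d.insert x (d.getD x 0 + 1)) PySem.Dict.empty,
    PySem.Dict.foldl_insert_getD_add_one_eq_counter]

-- the max scan never improves past an upper bound already reached
lemma loop2_stable : ∀ (L : List (Int × Int)) (b0 a0 : Int),
    (∀ p ∈ L, p.2 ≤ b0) → L.foldl aStep2 (b0, a0) = (b0, a0) := by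
  intro L
  induction L with
  | nil => intro b0 a0 _; rfl
  | cons hd rest ih =>
    intro b0 a0 hle
    have h1 : ¬ b0 < hd.2 := by have := hle hd (by simp); omega
    rw [List.foldl_cons]
    have : aStep2 (b0, a0) hd = (b0, a0) := by simp [aStep2, h1]
    rw [this]
    exact ih b0 a0 (fun p hp => hle p (by simp [hp]))

-- the max scan finds the maximum, with SOME key attaining it
lemma loop2_max : ∀ (L : List (Int × Int)) (b0 a0 b : Int),
    (∀ p ∈ L, p.2 ≤ b) → b0 < b → (∃ p ∈ L, p.2 = b) →
    ∃ k, (k, b) ∈ L ∧ L.foldl aStep2 (b0, a0) = (b, k) := by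
  intro L
  induction L with
  | nil => intro b0 a0 b _ _ hw; simp at hw
  | cons hd rest ih =>
    intro b0 a0 b hle hlt hw
    rw [List.foldl_cons]
    by_cases h1 : b0 < hd.2
    · have hstep : aStep2 (b0, a0) hd = (hd.2, hd.1) := by simp [aStep2, h1]
      rw [hstep]
      by_cases h2 : hd.2 = b
      · refine ⟨hd.1, by simp [← h2], ?_⟩
        rw [h2, loop2_stable rest b hd.1 (fun p hp => hle p (by simp [hp]))]
      · have hhd : hd.2 < b := by have := hle hd (by simp); omega
        obtain ⟨p, hp, hpb⟩ := hw
        have hpr : p ∈ rest := by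
          rcases List.mem_cons.mp hp with h | h
          · exfalso; exact h2 (h ▸ hpb)
          · exact h
        obtain ⟨k, hk, hres⟩ := ih hd.2 hd.1 b (fun p hp => hle p (by simp [hp])) hhd ⟨p, hpr, hpb⟩
        exact ⟨k, by simp [hk], hres⟩
    · have hstep : aStep2 (b0, a0) hd = (b0, a0) := by simp [aStep2, h1]
      rw [hstep]
      obtain ⟨p, hp, hpb⟩ := hw
      have hpr : p ∈ rest := by
        rcases List.mem_cons.mp hp with h | h
        · exfalso; subst h; omega
        · exact h
      obtain ⟨k, hk, hres⟩ := ih b0 a0 b (fun p hp => hle p (by simp [hp])) hlt ⟨p, hpr, hpb⟩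
      exact ⟨k, by simp [hk], hres⟩

-- the tie loop counts values equal to bindo, returning -1 as soon as two are seen
lemma loop3_spec : ∀ (vals : List Int) (b tmp ans : Int), tmp = 0 ∨ tmp = 1 →
    solLoop3 vals b tmp ans = if 2 ≤ tmp + (vals.count b : Int) then -1 else ans := by
  intro vals
  induction vals with
  | nil => intro b tmp ans htmp; simp [solLoop3]; omega
  | cons v rest ih =>
    intro b tmp ans htmp
    simp only [solLoop3]
    by_cases hv : v = b
    · have hbeq : (v == b) = true := by simpa using hv
      have hcnt : ((v :: rest).count b : Int) = (rest.count b : Int) + 1 := by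
        simp [hv]
      rw [hbeq]
      simp only [if_pos]
      by_cases h2 : tmp + 1 = 2
      · have : ((tmp + 1 == 2) = true) := by simpa using h2
        rw [this]
        simp only [if_pos]
        have : 2 ≤ tmp + ((v :: rest).count b : Int) := by
          have : (0:Int) ≤ (rest.count b : Int) := Int.natCast_nonneg _
          omega
        rw [if_pos this]
      · have hne : ((tmp + 1 == 2) = false) := by simpa using h2
        rw [hne]
        simp only [Bool.false_eq_true, if_false]
        rw [ih b (tmp + 1) ans (by omega)]
        rw [hcnt]
        congr 1
        simp only [eq_iff_iff]
        constructor <;> (intro h; omega)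
    · have hbeq : (v == b) = false := by simpa using hv
      have hcnt : ((v :: rest).count b : Int) = (rest.count b : Int) := by
        simp [hv]
      rw [hbeq]
      simp only [Bool.false_eq_true, if_false]
      by_cases h2 : tmp = 2
      · omega
      · have hne : ((tmp == 2) = false) := by simpa using h2
        rw [hne]
        simp only [Bool.false_eq_true, if_false]
        rw [ih b tmp ans htmp, hcnt]
  
-- two distinct members of a nodup list both satisfying p force countP ≥ 2
lemma two_le_countP (l : List Int) (p : Int → Bool) (x y : Int)
    (hx : x ∈ l) (hy : y ∈ l) (hxy : x ≠ y)
    (hpx : p x = true) (hpy : p y = true) : 2 ≤ l.countP p := by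
  have hxf : x ∈ l.filter p := List.mem_filter.mpr ⟨hx, hpx⟩
  have hyf : y ∈ l.filter p := List.mem_filter.mpr ⟨hy, hpy⟩
  rw [List.countP_eq_length_filter]
  match hft : l.filter p with
  | [] => rw [hft] at hxf; simp at hxf
  | [z] =>
    rw [hft] at hxf hyf
    simp at hxf hyf
    exact absurd (hxf.trans hyf.symm) hxy
  | a :: b :: t => simp

-- if every member satisfying p equals z, countP ≤ 1 on a nodup list
lemma countP_le_one (l : List Int) (p : Int → Bool) (z : Int)
    (hnd : l.Nodup) (huniq : ∀ x ∈ l, p x = true → x = z) : l.countP p ≤ 1 := by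
  rw [List.countP_eq_length_filter]
  match hft : l.filter p with
  | [] => simp
  | [a] => simp
  | a :: b :: t =>
    exfalso
    have hnf : (l.filter p).Nodup := hnd.filter p
    rw [hft] at hnf
    have ha : a ∈ l.filter p := by rw [hft]; simp
    have hb : b ∈ l.filter p := by rw [hft]; simp
    have haz := huniq a (List.mem_filter.mp ha).1 (List.mem_filter.mp ha).2
    have hbz := huniq b (List.mem_filter.mp hb).1 (List.mem_filter.mp hb).2
    have : a ≠ b := by
      intro h; subst h
      exact (List.nodup_cons.mp hnf).1 (by simp)
    exact this (haz.trans hbz.symm)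

-- main equivalence on a nonempty array, driven by the invariant
lemma solution_eq_alt (array : List Int) : solution array = solution_alt array := by
  match array with
  | [] => rfl
  | a0 :: arr =>
    set ar := a0 :: arr with har
    have hne : ar ≠ [] := by simp [har]
    obtain ⟨hb0, hle, _, hatt, hun, htie⟩ := inv_of_foldl ar
    set st := ar.foldl bStep (PySem.Dict.empty, 0, 0, false) with hst
    set bk := st.2.1
    set b := st.2.2.1
    set tie := st.2.2.2
    -- facts about b
    obtain ⟨w, hw, hwc⟩ := hatt hne
    have hb1 : 1 ≤ b := by have := cnt_pos ar w hw; omega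
    -- the items list of A's dict
    have hdict := adict_eq_counter ar
    simp only [solution, hdict]
    have hitems : (PySem.Dict.counter ar).items
        = (PySem.List.dedup ar).map (fun k => (k, (ar.count k : Int))) := by
      rw [PySem.Dict.items_counter]; simp
    have hvals : (PySem.Dict.counter ar).values
        = (PySem.List.dedup ar).map (fun k => (ar.count k : Int)) := by
      have : (PySem.Dict.counter ar).values = (PySem.Dict.counter ar).items.map (·.2) := rfl
      rw [this, hitems, List.map_map]; rfl
    have hnd : (PySem.List.dedup ar).Nodup := PySem.List.nodup_dedup ar
    -- loop2 computes (b, k) for some key k of multiplicity b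
    have hub : ∀ p ∈ (PySem.Dict.counter ar).items, p.2 ≤ b := by
      intro p hp
      rw [hitems] at hp
      obtain ⟨k, _, hk⟩ := List.mem_map.mp hp
      rw [← hk]; exact hle k
    have hwit : ∃ p ∈ (PySem.Dict.counter ar).items, p.2 = b := by
      refine ⟨(w, (ar.count w : Int)), ?_, hwc⟩
      rw [hitems]
      exact List.mem_map.mpr ⟨w, (PySem.List.mem_dedup ar w).mpr hw, rfl⟩
    obtain ⟨k, hkmem, hfold2⟩ := loop2_max (PySem.Dict.counter ar).items 0 0 b hub hb1 hwit
    have hkar : k ∈ ar ∧ cntI ar k = b := by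
      rw [hitems] at hkmem
      obtain ⟨k', hk', hkk⟩ := List.mem_map.mp hkmem
      have h1 : k' = k := congrArg Prod.fst hkk
      have h2 : (ar.count k' : Int) = b := congrArg Prod.snd hkk
      rw [h1] at hk' h2
      exact ⟨(PySem.List.mem_dedup ar k).mp hk', h2⟩
    rw [hfold2]
    -- the third loop's count over the values
    have hcv : ((PySem.Dict.counter ar).values.count b : Int)
        = ((PySem.List.dedup ar).countP (fun x => (ar.count x : Int) == b) : Int) := by
      rw [hvals, List.count_eq_countP, List.countP_map]
      rfl
    rw [loop3_spec _ _ _ _ (Or.inl rfl)]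
    -- compare with B
    simp only [solution_alt, ← hst]
    by_cases ht : tie = true
    · -- at least two keys at the max: A returns -1 too
      obtain ⟨x, hx, y, hy, hxy, hxc, hyc⟩ := htie ht
      have h2 : 2 ≤ (PySem.List.dedup ar).countP (fun x => (ar.count x : Int) == b) := by
        refine two_le_countP _ _ x y ((PySem.List.mem_dedup ar x).mpr hx)
          ((PySem.List.mem_dedup ar y).mpr hy) hxy (by simpa using hxc) (by simpa using hyc)
      rw [if_pos (by rw [hcv]; exact_mod_cast by omega),
        show st.2.2.2 = true from ht]
      simp
    · -- unique max: k = bk and no second value equals b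
      have htf : tie = false := by simpa using ht
      obtain ⟨hbk, hbkc, huniq⟩ := hun htf hne
      have hkbk : k = bk := huniq k hkar.1 hkar.2
      have h1 : (PySem.List.dedup ar).countP (fun x => (ar.count x : Int) == b) ≤ 1 := by
        refine countP_le_one _ _ bk hnd ?_
        intro x hx hpx
        exact huniq x ((PySem.List.mem_dedup ar x).mp hx) (by simpa using hpx)
      rw [if_neg (by rw [hcv]; exact_mod_cast by omega),
        show st.2.2.2 = false from htf]
      simpa using hkbk

-- ===== VERDICT (by name: the statement is the Claim_ definition above) =====
theorem solution_spec : Claim_equal_solution := by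
  intro array _
  unfold Spec_solution
  exact solution_eq_alt array
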